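-- pv_equiv track=rewrite | github.com/jayparikh37/jayparikh37.github.io | platin.py | punctuationFixer
-- ===== SOURCE A (Python) =====
-- def punctuationFixer(somePhrase):
--     '''fixes punctuation'''
--     newPhrase = ""
--     punctuationToKill = '''`~!:;'",./?-()'''
--     for letter in somePhrase:
--         if letter not in punctuationToKill:
--             newPhrase = newPhrase + letter
--     for letter in somePhrase:
--         if letter in punctuationToKill:
--             newPhrase = newPhrase + letter
--     return newPhrase
-- ===== SOURCE B (Python) =====
-- def punctuationFixer(somePhrase):
--     '''fixes punctuation'''
--     punctuationToKill = '''`~!:;'",./?-()'''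
--     return ''.join(sorted(somePhrase, key=lambda letter: letter in punctuationToKill))
-- ===== Notes on version B (the rewrite author's own statement) =====
-- stated objective: idiomatic
-- what changed: Replaced the two filtering passes that concatenate characters into a growing string with a single stable sort keyed on punctuation membership (False before True), joined once.
import Mathlib
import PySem

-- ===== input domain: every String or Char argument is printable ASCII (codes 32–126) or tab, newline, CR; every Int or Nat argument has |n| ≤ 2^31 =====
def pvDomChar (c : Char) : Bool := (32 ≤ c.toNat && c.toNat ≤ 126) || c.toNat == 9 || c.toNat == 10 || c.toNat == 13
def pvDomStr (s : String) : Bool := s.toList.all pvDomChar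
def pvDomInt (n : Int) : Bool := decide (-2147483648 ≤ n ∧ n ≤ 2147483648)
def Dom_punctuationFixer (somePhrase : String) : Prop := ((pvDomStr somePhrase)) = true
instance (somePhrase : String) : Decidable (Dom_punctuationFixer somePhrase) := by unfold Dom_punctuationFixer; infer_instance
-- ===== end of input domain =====

-- B replaces A's two filtering passes with one stable sort keyed on punctuation membership (idiomatic; not claimed faster).

-- the characters of the Python literal '''`~!:;'",./?-()'''
def punctuationToKill : List Char :=
  ['`', '~', '!', ':', ';', '\'', '"', ',', '.', '/', '?', '-', '(', ')']

-- ===== PORT A =====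
-- first loop: keep the non-punctuation letters; second loop: append the punctuation letters
def punctuationFixer (somePhrase : String) : String :=
  let pass1 : List Char :=
    somePhrase.toList.foldl
      (fun newPhrase letter =>
        if ¬ (letter ∈ punctuationToKill) then newPhrase ++ [letter] else newPhrase) []
  let pass2 : List Char :=
    somePhrase.toList.foldl
      (fun newPhrase letter =>
        if letter ∈ punctuationToKill then newPhrase ++ [letter] else newPhrase) pass1
  String.mk pass2

-- ===== PORT B =====
-- ''.join(sorted(somePhrase, key=lambda letter: letter in punctuationToKill))
def punctuationFixer_alt (somePhrase : String) : String :=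
  String.mk (PySem.List.sorted somePhrase.toList (fun letter => decide (letter ∈ punctuationToKill)))

-- ===== PRECONDITION & SPEC =====
def Spec_punctuationFixer (somePhrase : String) (out : String) : Prop := out = punctuationFixer_alt somePhrase
instance (somePhrase : String) (out : String) : Decidable (Spec_punctuationFixer somePhrase out) := by unfold Spec_punctuationFixer; infer_instance

-- ===== CLAIM (what is proved, stated in full; the proofs are below) =====
def Claim_equal_punctuationFixer : Prop := ∀ (somePhrase : String), Dom_punctuationFixer somePhrase → Spec_punctuationFixer somePhrase (punctuationFixer somePhrase)

-- ===== LEMMAS AND PROOFS =====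

-- inserting into a (false-keys ++ true-keys) list keeps the partition and the stable order
lemma insertBy_partition (key : Char → Bool) (x : Char) (A B : List Char)
    (hA : ∀ a ∈ A, key a = false) (hB : ∀ b ∈ B, key b = true) :
    PySem.List.insertBy (fun a b => decide (key a < key b)) x (A ++ B) =
      if key x then A ++ B ++ [x] else A ++ x :: B := by
  by_cases hx : key x
  · rw [if_pos hx, PySem.List.insertBy_of_forall_not_before, List.append_assoc]
    intro y _
    simp [hx]
  · have hx' : key x = false := by simpa using hx
    rw [if_neg hx]
    induction A with
    | nil =>
      simp only [List.nil_append]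
      cases B with
      | nil => rfl
      | cons b B' =>
        have hb := hB b (by simp)
        simp [PySem.List.insertBy, hb, hx']
    | cons a A' ih =>
      have ha := hA a (by simp)
      simp only [List.cons_append, PySem.List.insertBy, ha, hx']
      rw [if_neg (by simp)]
      rw [ih (fun a' ha' => hA a' (by simp [ha']))]

-- the insertion-sort fold with a Bool key partitions: false-keyed elements (in order) then true-keyed
lemma foldl_insertBy_partition (key : Char → Bool) :
    ∀ (xs A B : List Char), (∀ a ∈ A, key a = false) → (∀ b ∈ B, key b = true) →
    xs.foldl (fun acc x => PySem.List.insertBy (fun a b => decide (key a < key b)) x acc) (A ++ B) =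
      (A ++ xs.filter (fun c => !key c)) ++ (B ++ xs.filter key) := by
  intro xs
  induction xs with
  | nil => intro A B _ _; simp
  | cons x xs ih =>
    intro A B hA hB
    simp only [List.foldl_cons]
    rw [insertBy_partition key x A B hA hB]
    by_cases hx : key x
    · have hB' : ∀ b ∈ B ++ [x], key b = true := by
        intro b hb
        rcases List.mem_append.mp hb with h | h
        · exact hB b h
        · simp at h; simpa [h]
      rw [if_pos hx, List.append_assoc A B [x], ih A (B ++ [x]) hA hB']
      simp [hx, List.append_assoc]
    · have hx' : key x = false := by simpa using hx
      have hA' : ∀ a ∈ A ++ [x], key a = false := by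
        intro a ha
        rcases List.mem_append.mp ha with h | h
        · exact hA a h
        · simp at h; simpa [h]
      rw [if_neg hx, show A ++ x :: B = (A ++ [x]) ++ B by simp, ih (A ++ [x]) B hA' hB]
      simp [hx', List.append_assoc]

-- Python's stable sort by a Bool key is exactly "non-punctuation first, punctuation last"
lemma sorted_bool_key_eq_filter_append (key : Char → Bool) (xs : List Char) :
    PySem.List.sorted xs key = xs.filter (fun c => !key c) ++ xs.filter key := by
  rw [PySem.List.sorted_eq_foldl_insertBy]
  have := foldl_insertBy_partition key xs [] [] (by simp) (by simp)
  simpa using this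

-- A's two appending passes are the two filters
lemma punctuationFixer_eq_filters (s : String) :
    punctuationFixer s =
      String.mk (s.toList.filter (fun c => !decide (c ∈ punctuationToKill)) ++
                 s.toList.filter (fun c => decide (c ∈ punctuationToKill))) := by
  unfold punctuationFixer
  have h1 := PySem.List.foldl_append_if (fun c => !decide (c ∈ punctuationToKill)) id s.toList []
  have h2 := PySem.List.foldl_append_if (fun c => decide (c ∈ punctuationToKill)) id s.toList
    (s.toList.filter (fun c => !decide (c ∈ punctuationToKill)))
  simp only [List.map_id, List.nil_append, id] at h1 h2
  simp only []
  rw [show (fun (newPhrase : List Char) letter =>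
        if ¬ (letter ∈ punctuationToKill) then newPhrase ++ [letter] else newPhrase) =
      (fun acc x => if (!decide (x ∈ punctuationToKill)) = true then acc ++ [x] else acc) by
    funext acc x; simp]
  rw [h1]
  rw [show (fun (newPhrase : List Char) letter =>
        if letter ∈ punctuationToKill then newPhrase ++ [letter] else newPhrase) =
      (fun acc x => if (decide (x ∈ punctuationToKill)) = true then acc ++ [x] else acc) by
    funext acc x; simp]
  rw [h2]

-- ===== VERDICT (by name: the statement is the Claim_ definition above) =====
theorem punctuationFixer_spec : Claim_equal_punctuationFixer := by
  intro s _
  unfold Spec_punctuationFixer punctuationFixer_alt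
  rw [punctuationFixer_eq_filters, sorted_bool_key_eq_filter_append]
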